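-- pv_equiv track=rewrite | github.com/nhienvin/Web | vietnam-culture/tools/tools/export_sprite_from_atlas.py | shelf_pack
-- ===== SOURCE A (Python) =====
-- def shelf_pack(sizes, max_width, padding):
--     """
--     sizes: list of (id, w, h) in pixels
--     Return: placements dict id -> (x, y), sheet_w, sheet_h
--     Strategy: sort by height desc, place left-to-right, wrap to new shelf.
--     """
--     sizes_sorted = sorted(sizes, key=lambda x: x[2], reverse=True)
--     x = padding
--     y = padding
--     shelf_h = 0
--     sheet_w = max_width
--     placements = {}
--     for pid, w, h in sizes_sorted:
--         if x + w + padding > sheet_w: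
--             # new shelf
--             y += shelf_h + padding
--             x = padding
--             shelf_h = 0
--         placements[pid] = (x, y)
--         x += w + padding
--         shelf_h = max(shelf_h, h)
--     sheet_h = y + shelf_h + padding
--     return placements, sheet_w, sheet_h
-- ===== SOURCE B (Python) =====
-- def shelf_pack(sizes, max_width, padding):
--     """Two-pass shelf packing: first partition the height-desc-sorted items
--     into shelves (members with x-offsets + shelf height), then assign each
--     shelf its y and emit the placements. Same result as the fused loop."""
--     order = sorted(sizes, key=lambda t: t[2], reverse=True)
--     # pass 1: partition into shelves
--     shelves = []
--     cur, cur_x, cur_h = [], padding, 0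
--     for pid, w, h in order:
--         if cur_x + w + padding > max_width:
--             shelves.append((cur, cur_h))
--             cur, cur_x, cur_h = [], padding, 0
--         cur.append((pid, cur_x))
--         cur_x += w + padding
--         cur_h = max(cur_h, h)
--     shelves.append((cur, cur_h))
--     # pass 2: stack the shelves vertically
--     placements = {}
--     y = padding
--     for members, h in shelves:
--         for pid, x in members:
--             placements[pid] = (x, y)
--         y += h + padding
--     return placements, max_width, y
-- ===== Notes on version B (the rewrite author's own statement) =====
-- stated objective: alternative
-- what changed: B splits A's fused placement loop into two passes: it first partitions the height-desc-sorted items into a materialized list of shelves (members with their x-offsets plus the shelf height), then stacks the shelves, assigning each its y and emitting the placements.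
import Mathlib
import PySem

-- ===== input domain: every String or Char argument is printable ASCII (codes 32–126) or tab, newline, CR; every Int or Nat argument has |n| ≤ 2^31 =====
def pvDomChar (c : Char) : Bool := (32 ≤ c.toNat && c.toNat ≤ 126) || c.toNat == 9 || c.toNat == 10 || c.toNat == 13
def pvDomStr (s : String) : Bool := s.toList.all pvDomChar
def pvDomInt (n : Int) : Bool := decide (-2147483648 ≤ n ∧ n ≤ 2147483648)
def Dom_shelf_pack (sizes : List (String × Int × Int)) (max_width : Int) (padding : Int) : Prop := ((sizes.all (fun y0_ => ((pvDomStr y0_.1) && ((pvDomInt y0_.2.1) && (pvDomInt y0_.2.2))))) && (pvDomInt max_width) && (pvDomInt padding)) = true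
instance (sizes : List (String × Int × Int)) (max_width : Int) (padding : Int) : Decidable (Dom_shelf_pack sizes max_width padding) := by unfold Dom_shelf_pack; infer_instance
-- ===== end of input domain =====

-- B restructures A's single fused loop into two passes: pass 1 partitions the
-- height-desc-sorted items into a materialized list of shelves, pass 2 stacks
-- the shelves vertically and emits the placements.

-- ===== PORT A =====
-- loop body of A: state (x, y, shelf_h, placements)
def shelfStepA (max_width padding : Int)
    (st : Int × Int × Int × PySem.Dict String (Int × Int)) (it : String × Int × Int) :
    Int × Int × Int × PySem.Dict String (Int × Int) :=
  match st, it with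
  | (x, y, sh, pl), (pid, w, h) =>
    let (x, y, sh) :=
      if x + w + padding > max_width then (padding, y + sh + padding, (0 : Int)) else (x, y, sh)
    (x + w + padding, y, max sh h, pl.insert pid (x, y))

def shelf_pack (sizes : List (String × Int × Int)) (max_width : Int) (padding : Int) :
    (List (String × Int × Int)) × Int × Int :=
  let sizes_sorted := PySem.List.sorted sizes (fun t => t.2.2) true
  let st := sizes_sorted.foldl (shelfStepA max_width padding)
    (padding, padding, 0, PySem.Dict.empty)
  (st.2.2.2.items, max_width, st.2.1 + st.2.2.1 + padding)

-- ===== PORT B =====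
-- pass 1 loop body: state (finished shelves, current members, cur_x, cur_h)
def shelfStep1 (max_width padding : Int)
    (st : List (List (String × Int) × Int) × List (String × Int) × Int × Int)
    (it : String × Int × Int) :
    List (List (String × Int) × Int) × List (String × Int) × Int × Int :=
  match st, it with
  | (S, cur, cx, ch), (pid, w, h) =>
    let (S, cur, cx, ch) :=
      if cx + w + padding > max_width then (S ++ [(cur, ch)], ([] : List (String × Int)), padding, (0 : Int))
      else (S, cur, cx, ch)
    (S, cur ++ [(pid, cx)], cx + w + padding, max ch h)

-- pass 2 loop body: state (placements, y); place one shelf's members, advance y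
def placeShelf (padding : Int) (st : PySem.Dict String (Int × Int) × Int)
    (sh : List (String × Int) × Int) : PySem.Dict String (Int × Int) × Int :=
  (sh.1.foldl (fun pl m => pl.insert m.1 (m.2, st.2)) st.1, st.2 + sh.2 + padding)

def shelf_pack_alt (sizes : List (String × Int × Int)) (max_width : Int) (padding : Int) :
    (List (String × Int × Int)) × Int × Int :=
  let order := PySem.List.sorted sizes (fun t => t.2.2) true
  let p1 := order.foldl (shelfStep1 max_width padding) ([], [], padding, 0)
  let shelves := p1.1 ++ [(p1.2.1, p1.2.2.2)]
  let fin := shelves.foldl (placeShelf padding) (PySem.Dict.empty, padding)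
  (fin.1.items, max_width, fin.2)

-- ===== PRECONDITION & SPEC =====
def Spec_shelf_pack (sizes : List (String × Int × Int)) (max_width : Int) (padding : Int) (out : (List (String × Int × Int)) × Int × Int) : Prop := out = shelf_pack_alt sizes max_width padding
instance (sizes : List (String × Int × Int)) (max_width : Int) (padding : Int) (out : (List (String × Int × Int)) × Int × Int) : Decidable (Spec_shelf_pack sizes max_width padding out) := by unfold Spec_shelf_pack; infer_instance

-- ===== CLAIM (what is proved, stated in full; the proofs are below) =====
def Claim_equal_shelf_pack : Prop := ∀ (sizes : List (String × Int × Int)) (max_width : Int) (padding : Int), Dom_shelf_pack sizes max_width padding → Spec_shelf_pack sizes max_width padding (shelf_pack sizes max_width padding)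

-- ===== LEMMAS AND PROOFS =====

-- pass 1's shelves accumulator only ever grows on the right
theorem loop1_acc (mw p : Int) (l : List (String × Int × Int)) :
    ∀ (S : List (List (String × Int) × Int)) (cur : List (String × Int)) (cx ch : Int),
    List.foldl (shelfStep1 mw p) (S, cur, cx, ch) l =
      ((S ++ (List.foldl (shelfStep1 mw p) ([], cur, cx, ch) l).1),
        (List.foldl (shelfStep1 mw p) ([], cur, cx, ch) l).2) := by
  induction l with
  | nil => intro S cur cx ch; simp
  | cons a t ih =>
    intro S cur cx ch
    obtain ⟨pid, w, h⟩ := a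
    by_cases hw : cx + w + p > mw
    · simp only [List.foldl_cons, shelfStep1, if_pos hw]
      simp only [List.nil_append]
      rw [ih (S ++ [(cur, ch)]), ih [(cur, ch)]]
      simp [List.append_assoc]
    · simp only [List.foldl_cons, shelfStep1, if_neg hw]
      exact ih S (cur ++ [(pid, cx)]) (cx + w + p) (max ch h)

-- main invariant: A's fused loop, finalized, equals pass 2 applied to pass 1's
-- result, provided A's dict already holds the current shelf's members at y.
theorem fuse (mw p : Int) (l : List (String × Int × Int)) :
    ∀ (cur : List (String × Int)) (x h : Int) (pl : PySem.Dict String (Int × Int)) (y : Int),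
    ((List.foldl (shelfStepA mw p)
          (x, y, h, cur.foldl (fun d m => d.insert m.1 (m.2, y)) pl) l).2.2.2,
       (List.foldl (shelfStepA mw p)
          (x, y, h, cur.foldl (fun d m => d.insert m.1 (m.2, y)) pl) l).2.1 +
       (List.foldl (shelfStepA mw p)
          (x, y, h, cur.foldl (fun d m => d.insert m.1 (m.2, y)) pl) l).2.2.1 + p)
      = List.foldl (placeShelf p) (pl, y)
          ((List.foldl (shelfStep1 mw p) ([], cur, x, h) l).1 ++
            [((List.foldl (shelfStep1 mw p) ([], cur, x, h) l).2.1,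
              (List.foldl (shelfStep1 mw p) ([], cur, x, h) l).2.2.2)]) := by
  induction l with
  | nil =>
    intro cur x h pl y
    simp [placeShelf]
  | cons a t ih =>
    intro cur x h pl y
    obtain ⟨pid, w, h'⟩ := a
    by_cases hw : x + w + p > mw
    · simp only [List.foldl_cons, shelfStepA, shelfStep1, if_pos hw, List.nil_append]
      rw [loop1_acc]
      have step : (cur.foldl (fun d m => d.insert m.1 (m.2, y)) pl).insert pid (p, y + h + p)
          = List.foldl (fun d m => d.insert m.1 (m.2, y + h + p))
              ((cur.foldl (fun d m => d.insert m.1 (m.2, y)) pl)) [(pid, p)] := by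
        simp
      rw [step]
      rw [ih [(pid, p)] (p + w + p) (max 0 h')
            (cur.foldl (fun d m => d.insert m.1 (m.2, y)) pl) (y + h + p)]
      rw [List.append_assoc, List.foldl_append (f := placeShelf p) (l := [(cur, h)])]
      simp [placeShelf]
    · simp only [List.foldl_cons, shelfStepA, shelfStep1, if_neg hw, List.nil_append]
      have step : (cur.foldl (fun d m => d.insert m.1 (m.2, y)) pl).insert pid (x, y)
          = (cur ++ [(pid, x)]).foldl (fun d m => d.insert m.1 (m.2, y)) pl := by
        simp
      rw [step]
      exact ih (cur ++ [(pid, x)]) (x + w + p) (max h h') pl y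

-- ===== VERDICT (by name: the statement is the Claim_ definition above) =====
theorem shelf_pack_spec : Claim_equal_shelf_pack := by
  intro sizes mw p _
  unfold Spec_shelf_pack shelf_pack shelf_pack_alt
  have h := fuse mw p (PySem.List.sorted sizes (fun t => t.2.2) true) [] p 0 PySem.Dict.empty p
  simp only [List.foldl_nil] at h
  simp only []
  rw [← h]
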